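-- pv_equiv track=rewrite | github.com/IsseBisse/adventofcode | 2017/python/9/StreamProcessing.py | parse
-- ===== SOURCE A (Python) =====
-- def parse(stream):
-- 	groups = list()
-- 	garbage = list()
--
-- 	open_group_starts = list()
-- 	garbage_start = None
--
-- 	garbage_level = 1
-- 	skip_next = False
-- 	for idx, char in enumerate(stream):
-- 		if skip_next:
-- 			skip_next = False
-- 			continue
--
--
--
-- 		if char == "!":
-- 			skip_next = True
--
-- 		elif char == ">":
-- 			garbage.append(stream[garbage_start:idx+1])
-- 			garbage_start = None
--
-- 		if garbage_start is None:
-- 			if char == "{":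
-- 				open_group_starts.append((garbage_level, idx))
-- 				garbage_level += 1
--
-- 			elif char == "}":
-- 				level, start_idx = open_group_starts.pop()
-- 				groups.append((level, stream[start_idx:idx+1]))
-- 				garbage_level -= 1
--
-- 			elif char == "<":
-- 				garbage_start = idx
--
-- 	return groups, garbage
-- ===== SOURCE B (Python) =====
-- def _skip_garbage(stream, i):
--     # i: first index after '<'; return index of the closing '>' (current index if none)
--     n = len(stream)
--     while i < n:
--         c = stream[i]
--         if c == "!":
--             i += 2
--         elif c == ">":
--             return i
--         else:
--             i += 1
--     return i
--
--
-- def _parse_seq(stream, i, level, groups, garbage):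
--     # parse elements until the '}' closing the enclosing group; return its index
--     # (or the current index once past the end of the stream)
--     n = len(stream)
--     while i < n:
--         c = stream[i]
--         if c == "!":
--             i += 2
--         elif c == "<":
--             j = _skip_garbage(stream, i + 1)
--             if j < n:
--                 garbage.append(stream[i:j + 1])
--             i = j + 1
--         elif c == "{":
--             j = _parse_seq(stream, i + 1, level + 1, groups, garbage)
--             if j < n:
--                 groups.append((level, stream[i:j + 1]))
--             i = j + 1
--         elif c == "}":
--             return i
--         else:
--             i += 1
--     return i
--
--
-- def parse(stream):
--     groups = []
--     garbage = []
--     i = 0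
--     while i < len(stream):
--         i = _parse_seq(stream, i, 1, groups, garbage) + 1
--     return groups, garbage
-- ===== Notes on version B (the rewrite author's own statement) =====
-- stated objective: alternative
-- what changed: Replaces the single enumerate-loop with explicit open-group stack, garbage_start and skip_next flags by a recursive-descent parser over an explicit index: one recursive _parse_seq call per nesting level and a _skip_garbage helper, with no stack and no per-character state flags; Pre_ excludes streams with an unmatched '}' outside garbage, on which A raises IndexError.
-- intended difference: On streams containing a '>' outside any garbage run (honouring '!' skips), A appends the whole prefix stream[:i+1] to the garbage list (it slices from garbage_start=None), while B ignores the stray '>'; ignoring it is the intended behaviour since no garbage was open there. — e.g. on parse(">"): A returns ([], [">"]), B returns ([], [])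
-- outside the precondition, e.g. on parse('}'): A raises IndexError, B returns ([], [])
import Mathlib
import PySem

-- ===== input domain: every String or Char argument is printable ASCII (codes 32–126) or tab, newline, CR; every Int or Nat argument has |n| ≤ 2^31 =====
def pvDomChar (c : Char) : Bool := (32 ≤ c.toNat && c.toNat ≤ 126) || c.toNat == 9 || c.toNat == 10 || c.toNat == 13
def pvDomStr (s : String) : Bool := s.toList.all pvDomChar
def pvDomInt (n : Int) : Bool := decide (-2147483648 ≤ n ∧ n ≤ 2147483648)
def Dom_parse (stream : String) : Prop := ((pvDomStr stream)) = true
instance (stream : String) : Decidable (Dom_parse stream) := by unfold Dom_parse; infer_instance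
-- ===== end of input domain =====

-- B is a recursive-descent parser over an explicit index (one recursive call per group
-- level, garbage skipped by a helper) instead of A's single enumerate-loop with an
-- explicit stack of open groups; same cost, different decomposition.
-- B mutates its two Python accumulator lists in place; the return value is what is compared.

-- ===== PORT A =====
-- the for-loop of A over enumerate(stream); state: groups, garbage, open_group_starts,
-- garbage_start, garbage_level, skip_next.  stream[a:b] → PySem.Str.slice (a None start
-- slices from 0, as in Python); list.pop() on the empty stack raises IndexError in
-- Python — there (outside Pre_parse) the port just stops with the current lists.
def aLoop (stream : String) : List (Int × Char) → List (Int × String) → List String →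
    List (Int × Int) → Option Int → Int → Bool → (List (Int × String)) × List String
  | [], g, gb, _, _, _, _ => (g, gb)
  | (idx, c) :: rest, g, gb, st, gs, gl, skip =>
    if skip then aLoop stream rest g gb st gs gl false
    else if c = '!' then aLoop stream rest g gb st gs gl true
    else if c = '>' then
      aLoop stream rest g (gb ++ [PySem.Str.slice stream gs (some (idx + 1))]) st none gl false
    else if gs = none then
      if c = '{' then aLoop stream rest g gb (st ++ [(gl, idx)]) none (gl + 1) false
      else if c = '}' then
        match st.getLast? with
        | some (lv, sd) =>
            aLoop stream rest (g ++ [(lv, PySem.Str.slice stream (some sd) (some (idx + 1)))])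
              gb st.dropLast none (gl - 1) false
        | none => (g, gb)   -- Python: IndexError (excluded by Pre_parse)
      else if c = '<' then aLoop stream rest g gb st (some idx) gl false
      else aLoop stream rest g gb st none gl false
    else aLoop stream rest g gb st gs gl false

def parse (stream : String) : (List (Int × String)) × List String :=
  aLoop stream (PySem.List.enumerate stream.toList 0) [] [] [] none 1 false

-- ===== PORT B =====
-- the fuel argument of the three recursions below is a totality guard only (each
-- recursive call strictly increases i, so fuel = len(stream)+1 is never exhausted);
-- everything else is Source B step for step.

-- _skip_garbage: index of the closing '>' (the current index once past the end)
def skipGarbage (l : List Char) : Nat → Nat → Nat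
  | 0, i => i
  | fuel + 1, i =>
    if h : i < l.length then
      if l[i] = '!' then skipGarbage l fuel (i + 2)
      else if l[i] = '>' then i
      else skipGarbage l fuel (i + 1)
    else i

-- _parse_seq: parse elements until the '}' closing the enclosing group; returns
-- (index of that '}' — or the current index once past the end — , groups, garbage)
def parseSeq (stream : String) : Nat → Nat → Int → List (Int × String) → List String →
    Nat × (List (Int × String)) × List String
  | 0, i, _, g, gb => (i, g, gb)
  | fuel + 1, i, level, g, gb =>
    if h : i < stream.toList.length then
      if stream.toList[i] = '!' then parseSeq stream fuel (i + 2) level g gb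
      else if stream.toList[i] = '<' then
        let j := skipGarbage stream.toList (stream.toList.length + 1) (i + 1)
        if j < stream.toList.length then
          parseSeq stream fuel (j + 1) level g
            (gb ++ [PySem.Str.slice stream (some (i : Int)) (some ((j : Int) + 1))])
        else parseSeq stream fuel (j + 1) level g gb
      else if stream.toList[i] = '{' then
        let r1 := parseSeq stream fuel (i + 1) (level + 1) g gb
        if r1.1 < stream.toList.length then
          parseSeq stream fuel (r1.1 + 1) level
            (r1.2.1 ++ [(level, PySem.Str.slice stream (some (i : Int)) (some ((r1.1 : Int) + 1)))])
            r1.2.2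
        else parseSeq stream fuel (r1.1 + 1) level r1.2.1 r1.2.2
      else if stream.toList[i] = '}' then (i, g, gb)
      else parseSeq stream fuel (i + 1) level g gb
    else (i, g, gb)

-- the top-level while-loop of B's parse
def parseTop (stream : String) : Nat → Nat → List (Int × String) → List String →
    (List (Int × String)) × List String
  | 0, _, g, gb => (g, gb)
  | fuel + 1, i, g, gb =>
    if _h : i < stream.toList.length then
      let r := parseSeq stream (stream.toList.length + 1) i 1 g gb
      parseTop stream fuel (r.1 + 1) r.2.1 r.2.2
    else (g, gb)

def parse_alt (stream : String) : (List (Int × String)) × List String :=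
  parseTop stream (stream.toList.length + 1) 0 [] []

-- ===== PRECONDITION & SPEC =====
-- Pre_parse excludes exactly the streams on which A raises IndexError (a '}' reached
-- outside garbage with no open '{', honouring '!'-skips): pvBalStep is a 4-bit-state
-- recognizer for '}'-matching (ok, depth, in-garbage, skip-next), not either parser.
def pvBalStep : (Bool × Nat × Bool × Bool) → Char → (Bool × Nat × Bool × Bool)
  | (ok, d, gI, skip), c =>
    if skip then (ok, d, gI, false)
    else if c = '!' then (ok, d, gI, true)
    else if gI then (if c = '>' then (ok, d, false, false) else (ok, d, gI, false))
    else if c = '{' then (ok, d + 1, gI, false)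
    else if c = '}' then (ok && decide (0 < d), d - 1, gI, false)
    else if c = '<' then (ok, d, true, false)
    else (ok, d, gI, false)

def pvBalOk (l : List Char) (d : Nat) (gI : Bool) : Bool :=
  (l.foldl pvBalStep (true, d, gI, false)).1

def Pre_parse (stream : String) : Prop := pvBalOk stream.toList 0 false = true
instance (stream : String) : Decidable (Pre_parse stream) := by unfold Pre_parse; infer_instance

def pvWitness_parse : String := "{{<a!>b>}x}"

-- On streams containing a '>' outside any garbage run (honouring '!' skips), A appends the
-- whole prefix stream[:i+1] to the garbage list (it slices from garbage_start=None), while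
-- B ignores the stray '>'; ignoring it is the intended behaviour since no garbage was open.
-- pvStrayStep is a 3-bit-state recognizer (seen, in-garbage, skip-next) for such a '>'.
def pvStrayStep : (Bool × Bool × Bool) → Char → (Bool × Bool × Bool)
  | (seen, gI, skip), c =>
    if skip then (seen, gI, false)
    else if c = '!' then (seen, gI, true)
    else if gI then (if c = '>' then (seen, false, false) else (seen, true, false))
    else if c = '>' then (true, false, false)
    else if c = '<' then (seen, true, false)
    else (seen, false, false)

def pvStraySeen (l : List Char) (gI : Bool) : Bool :=
  (l.foldl pvStrayStep (false, gI, false)).1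

def D_parse (stream : String) : Prop := pvStraySeen stream.toList false = true
instance (stream : String) : Decidable (D_parse stream) := by unfold D_parse; infer_instance

def Spec_parse (stream : String) (out : (List (Int × String)) × List String) : Prop :=
  ¬ D_parse stream → out = parse_alt stream
instance (stream : String) (out : (List (Int × String)) × List String) : Decidable (Spec_parse stream out) := by unfold Spec_parse; infer_instance

def pvDiffWitness_parse : String := ">"
def pvDiffWitnessOut_parse : ((List (Int × String)) × List String) × ((List (Int × String)) × List String) :=
  (([], [">"]), ([], []))

-- ===== CLAIM (what is proved, stated in full; the proofs are below) =====
def Claim_unchanged_parse : Prop := ∀ (stream : String), Dom_parse stream → Pre_parse stream → Spec_parse stream (parse stream)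
def Claim_changed_parse : Prop := Dom_parse (pvDiffWitness_parse) ∧ Pre_parse (pvDiffWitness_parse) ∧ D_parse (pvDiffWitness_parse) ∧ parse (pvDiffWitness_parse) = pvDiffWitnessOut_parse.1 ∧ parse_alt (pvDiffWitness_parse) = pvDiffWitnessOut_parse.2 ∧ pvDiffWitnessOut_parse.1 ≠ pvDiffWitnessOut_parse.2

-- ===== LEMMAS AND PROOFS =====

-- the enumerate-suffix of A's loop starting at index i
def enumFrom (stream : String) (i : Nat) : List (Int × Char) :=
  PySem.List.enumerate (stream.toList.drop i) (i : Int)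

theorem enumFrom_zero (stream : String) :
    enumFrom stream 0 = PySem.List.enumerate stream.toList 0 := by
  simp [enumFrom]

theorem enumFrom_cons (stream : String) (i : Nat) (h : i < stream.toList.length) :
    enumFrom stream i = ((i : Int), stream.toList[i]) :: enumFrom stream (i + 1) := by
  unfold enumFrom
  rw [List.drop_eq_getElem_cons h, PySem.List.enumerate_cons]
  norm_num

theorem enumFrom_nil (stream : String) (i : Nat) (h : ¬ i < stream.toList.length) :
    enumFrom stream i = [] := by
  unfold enumFrom
  rw [List.drop_eq_nil_of_le (by omega)]
  simp [PySem.List.enumerate]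

-- once the ok flag is false it stays false
theorem balStep_false (s : Bool × Nat × Bool × Bool) (c : Char) (h : s.1 = false) :
    (pvBalStep s c).1 = false := by
  obtain ⟨ok, d, gI, skip⟩ := s
  subst h
  simp only [pvBalStep]
  split_ifs <;> simp

theorem balFoldl_false (l : List Char) (s : Bool × Nat × Bool × Bool) (h : s.1 = false) :
    (l.foldl pvBalStep s).1 = false := by
  induction l generalizing s with
  | nil => simpa using h
  | cons c cs ih => exact ih _ (balStep_false s c h)

-- once the seen flag is true it stays true
theorem strayStep_true (s : Bool × Bool × Bool) (c : Char) (h : s.1 = true) :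
    (pvStrayStep s c).1 = true := by
  obtain ⟨seen, gI, skip⟩ := s
  subst h
  simp only [pvStrayStep]
  split_ifs <;> simp

theorem strayFoldl_true (l : List Char) (s : Bool × Bool × Bool) (h : s.1 = true) :
    (l.foldl pvStrayStep s).1 = true := by
  induction l generalizing s with
  | nil => simpa using h
  | cons c cs ih => exact ih _ (strayStep_true s c h)

-- evaluation lemmas for the recognizers' step functions
theorem step_skip (ok : Bool) (d : Nat) (gI : Bool) (c : Char) :
    pvBalStep (ok, d, gI, true) c = (ok, d, gI, false) := rfl

theorem step_bang (ok : Bool) (d : Nat) (gI : Bool) :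
    pvBalStep (ok, d, gI, false) '!' = (ok, d, gI, true) := rfl

theorem step_g_gt (ok : Bool) (d : Nat) :
    pvBalStep (ok, d, true, false) '>' = (ok, d, false, false) := rfl

theorem step_g_other (ok : Bool) (d : Nat) (c : Char) (h1 : ¬ c = '!') :
    pvBalStep (ok, d, true, false) c = if c = '>' then (ok, d, false, false) else (ok, d, true, false) := by
  simp [pvBalStep, h1]

theorem step_open (ok : Bool) (d : Nat) :
    pvBalStep (ok, d, false, false) '{' = (ok, d + 1, false, false) := rfl

theorem step_close (ok : Bool) (d : Nat) :
    pvBalStep (ok, d, false, false) '}' = (ok && decide (0 < d), d - 1, false, false) := rfl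

theorem step_lt (ok : Bool) (d : Nat) :
    pvBalStep (ok, d, false, false) '<' = (ok, d, true, false) := rfl

theorem step_other (ok : Bool) (d : Nat) (c : Char) (h1 : ¬ c = '!') (h3 : ¬ c = '{')
    (h4 : ¬ c = '}') (h5 : ¬ c = '<') :
    pvBalStep (ok, d, false, false) c = if c = '>' then (ok, d, false, false) else (ok, d, false, false) := by
  simp [pvBalStep, h1, h3, h4, h5]

theorem sstep_skip (seen gI : Bool) (c : Char) :
    pvStrayStep (seen, gI, true) c = (seen, gI, false) := rfl

theorem sstep_bang (seen gI : Bool) :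
    pvStrayStep (seen, gI, false) '!' = (seen, gI, true) := rfl

theorem sstep_g (seen : Bool) (c : Char) (h1 : ¬ c = '!') :
    pvStrayStep (seen, true, false) c = if c = '>' then (seen, false, false) else (seen, true, false) := by
  simp [pvStrayStep, h1]

theorem sstep_gt (seen : Bool) :
    pvStrayStep (seen, false, false) '>' = (true, false, false) := rfl

theorem sstep_lt (seen : Bool) :
    pvStrayStep (seen, false, false) '<' = (seen, true, false) := rfl

theorem sstep_other (seen : Bool) (c : Char) (h1 : ¬ c = '!') (h2 : ¬ c = '>') (h3 : ¬ c = '<') :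
    pvStrayStep (seen, false, false) c = (seen, false, false) := by
  simp [pvStrayStep, h1, h2, h3]

-- evaluation lemmas for A's loop body
theorem aLoop_skip (stream : String) (idx : Int) (c : Char) (rest : List (Int × Char))
    (g : List (Int × String)) (gb : List String) (st : List (Int × Int)) (gs : Option Int) (gl : Int) :
    aLoop stream ((idx, c) :: rest) g gb st gs gl true = aLoop stream rest g gb st gs gl false := by
  simp [aLoop]

theorem aLoop_bang (stream : String) (idx : Int) (c : Char) (rest : List (Int × Char))
    (g : List (Int × String)) (gb : List String) (st : List (Int × Int)) (gs : Option Int) (gl : Int)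
    (hc : c = '!') :
    aLoop stream ((idx, c) :: rest) g gb st gs gl false = aLoop stream rest g gb st gs gl true := by
  simp [aLoop, hc]

theorem aLoop_gt (stream : String) (idx : Int) (c : Char) (rest : List (Int × Char))
    (g : List (Int × String)) (gb : List String) (st : List (Int × Int)) (gs : Option Int) (gl : Int)
    (hc : c = '>') :
    aLoop stream ((idx, c) :: rest) g gb st gs gl false =
      aLoop stream rest g (gb ++ [PySem.Str.slice stream gs (some (idx + 1))]) st none gl false := by
  simp [aLoop, hc]

theorem aLoop_open (stream : String) (idx : Int) (c : Char) (rest : List (Int × Char))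
    (g : List (Int × String)) (gb : List String) (st : List (Int × Int)) (gl : Int)
    (_h1 : ¬ c = '!') (_h2 : ¬ c = '>') (hc : c = '{') :
    aLoop stream ((idx, c) :: rest) g gb st none gl false =
      aLoop stream rest g gb (st ++ [(gl, idx)]) none (gl + 1) false := by
  simp [aLoop, hc]

theorem aLoop_close (stream : String) (idx : Int) (c : Char) (rest : List (Int × Char))
    (g : List (Int × String)) (gb : List String) (st' : List (Int × Int)) (lv sd : Int) (gl : Int)
    (_h1 : ¬ c = '!') (_h2 : ¬ c = '>') (hc : c = '}') :
    aLoop stream ((idx, c) :: rest) g gb (st' ++ [(lv, sd)]) none gl false =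
      aLoop stream rest (g ++ [(lv, PySem.Str.slice stream (some sd) (some (idx + 1)))]) gb
        st' none (gl - 1) false := by
  simp [aLoop, hc]

theorem aLoop_lt (stream : String) (idx : Int) (c : Char) (rest : List (Int × Char))
    (g : List (Int × String)) (gb : List String) (st : List (Int × Int)) (gl : Int)
    (_h1 : ¬ c = '!') (_h2 : ¬ c = '>') (_h3 : ¬ c = '{') (_h4 : ¬ c = '}') (hc : c = '<') :
    aLoop stream ((idx, c) :: rest) g gb st none gl false =
      aLoop stream rest g gb st (some idx) gl false := by
  simp [aLoop, hc]

theorem aLoop_other (stream : String) (idx : Int) (c : Char) (rest : List (Int × Char))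
    (g : List (Int × String)) (gb : List String) (st : List (Int × Int)) (gl : Int)
    (h1 : ¬ c = '!') (h2 : ¬ c = '>') (h3 : ¬ c = '{') (h4 : ¬ c = '}') (h5 : ¬ c = '<') :
    aLoop stream ((idx, c) :: rest) g gb st none gl false =
      aLoop stream rest g gb st none gl false := by
  simp [aLoop, h1, h2, h3, h4, h5]

theorem aLoop_inG (stream : String) (idx : Int) (c : Char) (rest : List (Int × Char))
    (g : List (Int × String)) (gb : List String) (st : List (Int × Int)) (k : Int) (gl : Int)
    (h1 : ¬ c = '!') (h2 : ¬ c = '>') :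
    aLoop stream ((idx, c) :: rest) g gb st (some k) gl false =
      aLoop stream rest g gb st (some k) gl false := by
  simp [aLoop, h1, h2]


-- unfolding lemmas for B's _skip_garbage
theorem skipGarbage_nil (l : List Char) (F i : Nat) (hi : ¬ i < l.length) :
    skipGarbage l F i = i := by
  cases F with
  | zero => rfl
  | succ F => simp only [skipGarbage]; rw [dif_neg hi]

theorem skipGarbage_bang (l : List Char) (F i : Nat) (hi : i < l.length)
    (hc : l[i] = '!') : skipGarbage l (F + 1) i = skipGarbage l F (i + 2) := by
  simp only [skipGarbage]; rw [dif_pos hi, if_pos hc]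

theorem skipGarbage_gtc (l : List Char) (F i : Nat) (hi : i < l.length)
    (hc1 : ¬ l[i] = '!') (hc : l[i] = '>') : skipGarbage l (F + 1) i = i := by
  simp only [skipGarbage]; rw [dif_pos hi, if_neg hc1, if_pos hc]

theorem skipGarbage_step (l : List Char) (F i : Nat) (hi : i < l.length)
    (hc1 : ¬ l[i] = '!') (hc2 : ¬ l[i] = '>') :
    skipGarbage l (F + 1) i = skipGarbage l F (i + 1) := by
  simp only [skipGarbage]; rw [dif_pos hi, if_neg hc1, if_neg hc2]

theorem skipGarbage_ge (l : List Char) (F : Nat) : ∀ i, i ≤ skipGarbage l F i := by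
  induction F with
  | zero => intro i; exact le_rfl
  | succ F ih =>
    intro i
    by_cases hi : i < l.length
    · by_cases hc : l[i] = '!'
      · rw [skipGarbage_bang l F i hi hc]; have := ih (i + 2); omega
      · by_cases hgt : l[i] = '>'
        · rw [skipGarbage_gtc l F i hi hc hgt]
        · rw [skipGarbage_step l F i hi hc hgt]; have := ih (i + 1); omega
    · rw [skipGarbage_nil l _ i hi]

-- unfolding lemmas for B's _parse_seq
theorem parseSeq_nil (stream : String) (f i : Nat) (lv : Int) (g : List (Int × String))
    (gb : List String) (hi : ¬ i < stream.toList.length) :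
    parseSeq stream f i lv g gb = (i, g, gb) := by
  cases f with
  | zero => rfl
  | succ f => simp only [parseSeq]; rw [dif_neg hi]

theorem parseSeq_bang (stream : String) (f i : Nat) (lv : Int) (g : List (Int × String))
    (gb : List String) (hi : i < stream.toList.length) (hc : stream.toList[i] = '!') :
    parseSeq stream (f + 1) i lv g gb = parseSeq stream f (i + 2) lv g gb := by
  simp only [parseSeq]; rw [dif_pos hi, if_pos hc]

theorem parseSeq_lt (stream : String) (f i : Nat) (lv : Int) (g : List (Int × String))
    (gb : List String) (hi : i < stream.toList.length) (hc1 : ¬ stream.toList[i] = '!')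
    (hc : stream.toList[i] = '<') :
    parseSeq stream (f + 1) i lv g gb =
      (if skipGarbage stream.toList (stream.toList.length + 1) (i + 1) < stream.toList.length then
        parseSeq stream f (skipGarbage stream.toList (stream.toList.length + 1) (i + 1) + 1) lv g
          (gb ++ [PySem.Str.slice stream (some (i : Int))
            (some ((skipGarbage stream.toList (stream.toList.length + 1) (i + 1) : Int) + 1))])
      else
        parseSeq stream f (skipGarbage stream.toList (stream.toList.length + 1) (i + 1) + 1) lv
          g gb) := by
  simp only [parseSeq]; rw [dif_pos hi, if_neg hc1, if_pos hc]

theorem parseSeq_open (stream : String) (f i : Nat) (lv : Int) (g : List (Int × String))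
    (gb : List String) (hi : i < stream.toList.length) (hc1 : ¬ stream.toList[i] = '!')
    (hc2 : ¬ stream.toList[i] = '<') (hc : stream.toList[i] = '{') :
    parseSeq stream (f + 1) i lv g gb =
      (if (parseSeq stream f (i + 1) (lv + 1) g gb).1 < stream.toList.length then
        parseSeq stream f ((parseSeq stream f (i + 1) (lv + 1) g gb).1 + 1) lv
          ((parseSeq stream f (i + 1) (lv + 1) g gb).2.1 ++
            [(lv, PySem.Str.slice stream (some (i : Int))
              (some (((parseSeq stream f (i + 1) (lv + 1) g gb).1 : Int) + 1)))])
          (parseSeq stream f (i + 1) (lv + 1) g gb).2.2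
      else
        parseSeq stream f ((parseSeq stream f (i + 1) (lv + 1) g gb).1 + 1) lv
          (parseSeq stream f (i + 1) (lv + 1) g gb).2.1
          (parseSeq stream f (i + 1) (lv + 1) g gb).2.2) := by
  simp only [parseSeq]; rw [dif_pos hi, if_neg hc1, if_neg hc2, if_pos hc]

theorem parseSeq_close (stream : String) (f i : Nat) (lv : Int) (g : List (Int × String))
    (gb : List String) (hi : i < stream.toList.length) (hc1 : ¬ stream.toList[i] = '!')
    (hc2 : ¬ stream.toList[i] = '<') (hc3 : ¬ stream.toList[i] = '{')
    (hc : stream.toList[i] = '}') :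
    parseSeq stream (f + 1) i lv g gb = (i, g, gb) := by
  simp only [parseSeq]; rw [dif_pos hi, if_neg hc1, if_neg hc2, if_neg hc3, if_pos hc]

theorem parseSeq_other (stream : String) (f i : Nat) (lv : Int) (g : List (Int × String))
    (gb : List String) (hi : i < stream.toList.length) (hc1 : ¬ stream.toList[i] = '!')
    (hc2 : ¬ stream.toList[i] = '<') (hc3 : ¬ stream.toList[i] = '{')
    (hc4 : ¬ stream.toList[i] = '}') :
    parseSeq stream (f + 1) i lv g gb = parseSeq stream f (i + 1) lv g gb := by
  simp only [parseSeq]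
  rw [dif_pos hi, if_neg hc1, if_neg hc2, if_neg hc3, if_neg hc4]

theorem parseSeq_ge (stream : String) (f : Nat) :
    ∀ (i : Nat) (lv : Int) (g : List (Int × String)) (gb : List String),
      i ≤ (parseSeq stream f i lv g gb).1 := by
  induction f with
  | zero => intro i lv g gb; exact le_rfl
  | succ f ih =>
    intro i lv g gb
    by_cases hi : i < stream.toList.length
    · by_cases hc1 : stream.toList[i] = '!'
      · rw [parseSeq_bang stream f i lv g gb hi hc1]; have := ih (i + 2) lv g gb; omega
      · by_cases hc2 : stream.toList[i] = '<'
        · rw [parseSeq_lt stream f i lv g gb hi hc1 hc2]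
          have hsg := skipGarbage_ge stream.toList (stream.toList.length + 1) (i + 1)
          split
          · have := ih (skipGarbage stream.toList (stream.toList.length + 1) (i + 1) + 1) lv g
              (gb ++ [PySem.Str.slice stream (some (i : Int))
                (some ((skipGarbage stream.toList (stream.toList.length + 1) (i + 1) : Int) + 1))])
            omega
          · have := ih (skipGarbage stream.toList (stream.toList.length + 1) (i + 1) + 1) lv g gb
            omega
        · by_cases hc3 : stream.toList[i] = '{'
          · rw [parseSeq_open stream f i lv g gb hi hc1 hc2 hc3]
            have h1 := ih (i + 1) (lv + 1) g gb
            split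
            · have := ih ((parseSeq stream f (i + 1) (lv + 1) g gb).1 + 1) lv
                ((parseSeq stream f (i + 1) (lv + 1) g gb).2.1 ++
                  [(lv, PySem.Str.slice stream (some (i : Int))
                    (some (((parseSeq stream f (i + 1) (lv + 1) g gb).1 : Int) + 1)))])
                (parseSeq stream f (i + 1) (lv + 1) g gb).2.2
              omega
            · have := ih ((parseSeq stream f (i + 1) (lv + 1) g gb).1 + 1) lv
                (parseSeq stream f (i + 1) (lv + 1) g gb).2.1
                (parseSeq stream f (i + 1) (lv + 1) g gb).2.2
              omega
          · by_cases hc4 : stream.toList[i] = '}'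
            · rw [parseSeq_close stream f i lv g gb hi hc1 hc2 hc3 hc4]
            · rw [parseSeq_other stream f i lv g gb hi hc1 hc2 hc3 hc4]
              have := ih (i + 1) lv g gb
              omega
    · rw [parseSeq_nil stream _ i lv g gb hi]

theorem parseTop_nil (stream : String) (f i : Nat) (g : List (Int × String))
    (gb : List String) (hi : ¬ i < stream.toList.length) :
    parseTop stream f i g gb = (g, gb) := by
  cases f with
  | zero => rfl
  | succ f => simp only [parseTop]; rw [dif_neg hi]

theorem parseTop_succ (stream : String) (f i : Nat) (g : List (Int × String))
    (gb : List String) (hi : i < stream.toList.length) :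
    parseTop stream (f + 1) i g gb =
      parseTop stream f ((parseSeq stream (stream.toList.length + 1) i 1 g gb).1 + 1)
        (parseSeq stream (stream.toList.length + 1) i 1 g gb).2.1
        (parseSeq stream (stream.toList.length + 1) i 1 g gb).2.2 := by
  simp only [parseTop]; rw [dif_pos hi]

-- the bal recognizer in garbage mode agrees with B's _skip_garbage
theorem bal_garbage_lemma (stream : String) (cnt : Nat) : ∀ (i : Nat),
    stream.toList.length - i < cnt → ∀ (F : Nat), stream.toList.length + 1 - i ≤ F →
    ∀ (d : Nat),
    pvBalOk (stream.toList.drop i) d true =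
      (if skipGarbage stream.toList F i < stream.toList.length then
        pvBalOk (stream.toList.drop (skipGarbage stream.toList F i + 1)) d false
      else true) := by
  induction cnt with
  | zero => intro i hf; omega
  | succ cnt ih =>
    intro i hf F hF d
    by_cases hi : i < stream.toList.length
    · obtain ⟨F', rfl⟩ : ∃ F', F = F' + 1 := ⟨F - 1, by omega⟩
      have hd : stream.toList.drop i = stream.toList[i] :: stream.toList.drop (i + 1) :=
        List.drop_eq_getElem_cons hi
      by_cases hc : stream.toList[i] = '!'
      · have hs : skipGarbage stream.toList (F' + 1) i = skipGarbage stream.toList F' (i + 2) :=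
          skipGarbage_bang _ _ _ hi hc
        by_cases hi1 : i + 1 < stream.toList.length
        · have hd1 : stream.toList.drop (i + 1) =
              stream.toList[i + 1] :: stream.toList.drop (i + 2) :=
            List.drop_eq_getElem_cons hi1
          rw [hd, hd1, hs]
          simp only [pvBalOk, List.foldl_cons, hc, step_bang, step_skip]
          exact ih (i + 2) (by omega) F' (by omega) d
        · have hd1 : stream.toList.drop (i + 1) = [] :=
            List.drop_eq_nil_of_le (by omega)
          have hn2 : ¬ i + 2 < stream.toList.length := by omega
          have hs2 : skipGarbage stream.toList F' (i + 2) = i + 2 :=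
            skipGarbage_nil _ _ _ hn2
          rw [hd, hd1, hs, hs2, if_neg hn2]
          simp only [pvBalOk, List.foldl_cons, List.foldl_nil, hc, step_bang]
      · by_cases hgt : stream.toList[i] = '>'
        · have hs : skipGarbage stream.toList (F' + 1) i = i :=
            skipGarbage_gtc _ _ _ hi hc hgt
          rw [hd, hs, if_pos hi]
          simp only [pvBalOk, List.foldl_cons, hgt, step_g_gt]
        · have hs : skipGarbage stream.toList (F' + 1) i = skipGarbage stream.toList F' (i + 1) :=
            skipGarbage_step _ _ _ hi hc hgt
          rw [hd, hs]
          simp only [pvBalOk, List.foldl_cons, step_g_other _ _ _ hc, if_neg hgt]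
          exact ih (i + 1) (by omega) F' (by omega) d
    · have hd : stream.toList.drop i = [] := List.drop_eq_nil_of_le (by omega)
      have hs : skipGarbage stream.toList F i = i := skipGarbage_nil _ _ _ hi
      rw [hd, hs, if_neg hi]
      simp [pvBalOk]

-- the stray recognizer in garbage mode agrees with B's _skip_garbage
theorem stray_garbage_lemma (stream : String) (cnt : Nat) : ∀ (i : Nat),
    stream.toList.length - i < cnt → ∀ (F : Nat), stream.toList.length + 1 - i ≤ F →
    pvStraySeen (stream.toList.drop i) true =
      (if skipGarbage stream.toList F i < stream.toList.length then
        pvStraySeen (stream.toList.drop (skipGarbage stream.toList F i + 1)) false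
      else false) := by
  induction cnt with
  | zero => intro i hf; omega
  | succ cnt ih =>
    intro i hf F hF
    by_cases hi : i < stream.toList.length
    · obtain ⟨F', rfl⟩ : ∃ F', F = F' + 1 := ⟨F - 1, by omega⟩
      have hd : stream.toList.drop i = stream.toList[i] :: stream.toList.drop (i + 1) :=
        List.drop_eq_getElem_cons hi
      by_cases hc : stream.toList[i] = '!'
      · have hs : skipGarbage stream.toList (F' + 1) i = skipGarbage stream.toList F' (i + 2) :=
          skipGarbage_bang _ _ _ hi hc
        by_cases hi1 : i + 1 < stream.toList.length
        · have hd1 : stream.toList.drop (i + 1) =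
              stream.toList[i + 1] :: stream.toList.drop (i + 2) :=
            List.drop_eq_getElem_cons hi1
          rw [hd, hd1, hs]
          simp only [pvStraySeen, List.foldl_cons, hc, sstep_bang, sstep_skip]
          exact ih (i + 2) (by omega) F' (by omega)
        · have hd1 : stream.toList.drop (i + 1) = [] :=
            List.drop_eq_nil_of_le (by omega)
          have hn2 : ¬ i + 2 < stream.toList.length := by omega
          have hs2 : skipGarbage stream.toList F' (i + 2) = i + 2 :=
            skipGarbage_nil _ _ _ hn2
          rw [hd, hd1, hs, hs2, if_neg hn2]
          simp only [pvStraySeen, List.foldl_cons, List.foldl_nil, hc, sstep_bang]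
      · by_cases hgt : stream.toList[i] = '>'
        · have hs : skipGarbage stream.toList (F' + 1) i = i :=
            skipGarbage_gtc _ _ _ hi hc hgt
          rw [hd, hs, if_pos hi]
          have hstep : pvStrayStep (false, true, false) '>' = (false, false, false) := rfl
          simp only [pvStraySeen, List.foldl_cons, hgt, hstep]
        · have hs : skipGarbage stream.toList (F' + 1) i = skipGarbage stream.toList F' (i + 1) :=
            skipGarbage_step _ _ _ hi hc hgt
          rw [hd, hs]
          simp only [pvStraySeen, List.foldl_cons, sstep_g _ _ hc, if_neg hgt]
          exact ih (i + 1) (by omega) F' (by omega)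
    · have hd : stream.toList.drop i = [] := List.drop_eq_nil_of_le (by omega)
      have hs : skipGarbage stream.toList F i = i := skipGarbage_nil _ _ _ hi
      rw [hd, hs, if_neg hi]
      simp [pvStraySeen]

-- A's loop while garbage is open agrees with B's _skip_garbage
theorem garbage_lemma (stream : String) (cnt : Nat) : ∀ (i : Nat),
    stream.toList.length - i < cnt → ∀ (F : Nat), stream.toList.length + 1 - i ≤ F →
    ∀ (k : Int) (st : List (Int × Int)) (gl : Int) (g : List (Int × String)) (gb : List String),
    aLoop stream (enumFrom stream i) g gb st (some k) gl false =
      (if skipGarbage stream.toList F i < stream.toList.length then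
        aLoop stream (enumFrom stream (skipGarbage stream.toList F i + 1)) g
          (gb ++ [PySem.Str.slice stream (some k) (some ((skipGarbage stream.toList F i : Int) + 1))])
          st none gl false
      else (g, gb)) := by
  induction cnt with
  | zero => intro i hf; omega
  | succ cnt ih =>
    intro i hf F hF k st gl g gb
    by_cases hi : i < stream.toList.length
    · obtain ⟨F', rfl⟩ : ∃ F', F = F' + 1 := ⟨F - 1, by omega⟩
      rw [enumFrom_cons _ _ hi]
      by_cases hc : stream.toList[i] = '!'
      · have hs : skipGarbage stream.toList (F' + 1) i = skipGarbage stream.toList F' (i + 2) :=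
          skipGarbage_bang _ _ _ hi hc
        rw [aLoop_bang _ _ _ _ _ _ _ _ _ hc]
        by_cases hi1 : i + 1 < stream.toList.length
        · rw [enumFrom_cons _ _ hi1, aLoop_skip, hs]
          exact ih (i + 2) (by omega) F' (by omega) k st gl g gb
        · have hn2 : ¬ i + 2 < stream.toList.length := by omega
          have hs2 : skipGarbage stream.toList F' (i + 2) = i + 2 :=
            skipGarbage_nil _ _ _ hn2
          rw [enumFrom_nil _ _ hi1, hs, hs2, if_neg hn2]
          simp [aLoop]
      · by_cases hgt : stream.toList[i] = '>'
        · have hs : skipGarbage stream.toList (F' + 1) i = i :=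
            skipGarbage_gtc _ _ _ hi hc hgt
          rw [aLoop_gt _ _ _ _ _ _ _ _ _ hgt, hs, if_pos hi]
        · have hs : skipGarbage stream.toList (F' + 1) i = skipGarbage stream.toList F' (i + 1) :=
            skipGarbage_step _ _ _ hi hc hgt
          rw [aLoop_inG _ _ _ _ _ _ _ _ _ hc hgt, hs]
          exact ih (i + 1) (by omega) F' (by omega) k st gl g gb
    · have hs : skipGarbage stream.toList F i = i := skipGarbage_nil _ _ _ hi
      rw [enumFrom_nil _ _ hi, hs, if_neg hi]
      simp [aLoop]

-- the main invariant: from any position with no garbage open, no stray '>' ahead at this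
-- mode, and open-group stack st, A's loop equals one _parse_seq call followed by A's own
-- '}' step for the enclosing group
theorem main_lemma (stream : String) (cnt : Nat) : ∀ (i : Nat),
    stream.toList.length - i < cnt → ∀ (fb : Nat), stream.toList.length + 1 - i ≤ fb →
    ∀ (st : List (Int × Int)) (g : List (Int × String)) (gb : List String),
    pvBalOk (stream.toList.drop i) st.length false = true →
    pvStraySeen (stream.toList.drop i) false = false →
    (((parseSeq stream fb i ((st.length : Int) + 1) g gb).1 < stream.toList.length →
      st ≠ [] ∧ pvBalOk (stream.toList.drop ((parseSeq stream fb i ((st.length : Int) + 1) g gb).1 + 1))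
        (st.length - 1) false = true ∧
      pvStraySeen (stream.toList.drop ((parseSeq stream fb i ((st.length : Int) + 1) g gb).1 + 1))
        false = false)
    ∧ aLoop stream (enumFrom stream i) g gb st none ((st.length : Int) + 1) false =
      (if (parseSeq stream fb i ((st.length : Int) + 1) g gb).1 < stream.toList.length then
        match st.getLast? with
        | some (lv, sd) =>
            aLoop stream (enumFrom stream ((parseSeq stream fb i ((st.length : Int) + 1) g gb).1 + 1))
              ((parseSeq stream fb i ((st.length : Int) + 1) g gb).2.1 ++
                [(lv, PySem.Str.slice stream (some sd)
                    (some (((parseSeq stream fb i ((st.length : Int) + 1) g gb).1 : Int) + 1)))])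
              (parseSeq stream fb i ((st.length : Int) + 1) g gb).2.2 st.dropLast none
              (st.length : Int) false
        | none => ((parseSeq stream fb i ((st.length : Int) + 1) g gb).2.1,
                   (parseSeq stream fb i ((st.length : Int) + 1) g gb).2.2)
      else ((parseSeq stream fb i ((st.length : Int) + 1) g gb).2.1,
            (parseSeq stream fb i ((st.length : Int) + 1) g gb).2.2))) := by
  induction cnt with
  | zero => intro i hf; omega
  | succ cnt ih =>
    intro i hf fb hfb st g gb hb hstray
    by_cases hi : i < stream.toList.length
    · obtain ⟨fb', rfl⟩ : ∃ fb', fb = fb' + 1 := ⟨fb - 1, by omega⟩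
      have hd : stream.toList.drop i = stream.toList[i] :: stream.toList.drop (i + 1) :=
        List.drop_eq_getElem_cons hi
      rw [enumFrom_cons _ _ hi]
      by_cases hc1 : stream.toList[i] = '!'
      · rw [parseSeq_bang stream fb' i ((st.length : Int) + 1) g gb hi hc1,
          aLoop_bang _ _ _ _ _ _ _ _ _ hc1]
        by_cases hi1 : i + 1 < stream.toList.length
        · have hd1 : stream.toList.drop (i + 1) =
              stream.toList[i + 1] :: stream.toList.drop (i + 2) :=
            List.drop_eq_getElem_cons hi1
          have hb2 : pvBalOk (stream.toList.drop (i + 2)) st.length false = true := by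
            rw [hd, hd1] at hb
            simpa only [pvBalOk, List.foldl_cons, hc1, step_bang, step_skip] using hb
          have hs2 : pvStraySeen (stream.toList.drop (i + 2)) false = false := by
            rw [hd, hd1] at hstray
            simpa only [pvStraySeen, List.foldl_cons, hc1, sstep_bang, sstep_skip] using hstray
          rw [enumFrom_cons _ _ hi1, aLoop_skip]
          exact ih (i + 2) (by omega) fb' (by omega) st g gb hb2 hs2
        · have hn2 : ¬ i + 2 < stream.toList.length := by omega
          rw [parseSeq_nil stream fb' (i + 2) ((st.length : Int) + 1) g gb hn2]
          rw [enumFrom_nil _ _ hi1]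
          constructor
          · intro hlt; dsimp at hlt; omega
          · rw [if_neg (by dsimp; omega)]
            simp [aLoop]
      · by_cases hc2 : stream.toList[i] = '<'
        · have hgt : ¬ stream.toList[i] = '>' := by rw [hc2]; decide
          have hob : ¬ stream.toList[i] = '{' := by rw [hc2]; decide
          have hcb : ¬ stream.toList[i] = '}' := by rw [hc2]; decide
          have hb1 : pvBalOk (stream.toList.drop (i + 1)) st.length true = true := by
            rw [hd] at hb
            simpa only [pvBalOk, List.foldl_cons, hc2, step_lt] using hb
          have hs1 : pvStraySeen (stream.toList.drop (i + 1)) true = false := by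
            rw [hd] at hstray
            simpa only [pvStraySeen, List.foldl_cons, hc2, sstep_lt] using hstray
          have hbg := bal_garbage_lemma stream (stream.toList.length + 1) (i + 1) (by omega)
            (stream.toList.length + 1) (by omega) st.length
          have hsgl := stray_garbage_lemma stream (stream.toList.length + 1) (i + 1) (by omega)
            (stream.toList.length + 1) (by omega)
          have hsg := skipGarbage_ge stream.toList (stream.toList.length + 1) (i + 1)
          rw [parseSeq_lt stream fb' i ((st.length : Int) + 1) g gb hi hc1 hc2,
            aLoop_lt _ _ _ _ _ _ _ _ hc1 hgt hob hcb hc2,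
            garbage_lemma stream (stream.toList.length + 1) (i + 1) (by omega)
              (stream.toList.length + 1) (by omega) (i : Int) st ((st.length : Int) + 1) g gb]
          by_cases hsl : skipGarbage stream.toList (stream.toList.length + 1) (i + 1) <
              stream.toList.length
          · have hb2 : pvBalOk
                (stream.toList.drop (skipGarbage stream.toList (stream.toList.length + 1) (i + 1) + 1))
                st.length false = true := by
              rw [hbg, if_pos hsl] at hb1; exact hb1
            have hs2 : pvStraySeen
                (stream.toList.drop (skipGarbage stream.toList (stream.toList.length + 1) (i + 1) + 1))
                false = false := by
              rw [hsgl, if_pos hsl] at hs1; exact hs1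
            rw [if_pos hsl, if_pos hsl]
            exact ih (skipGarbage stream.toList (stream.toList.length + 1) (i + 1) + 1) (by omega)
              fb' (by omega) st g
              (gb ++ [PySem.Str.slice stream (some (i : Int))
                (some ((skipGarbage stream.toList (stream.toList.length + 1) (i + 1) : Int) + 1))]) hb2 hs2
          · rw [if_neg hsl, if_neg hsl,
              parseSeq_nil stream fb'
                (skipGarbage stream.toList (stream.toList.length + 1) (i + 1) + 1)
                ((st.length : Int) + 1) g gb (by omega)]
            constructor
            · intro hlt; dsimp at hlt; omega
            · rw [if_neg (by dsimp; omega)]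
        · by_cases hc3 : stream.toList[i] = '{'
          · have hgt : ¬ stream.toList[i] = '>' := by rw [hc3]; decide
            have hlt5 : ¬ stream.toList[i] = '<' := by rw [hc3]; decide
            have hb1 : pvBalOk (stream.toList.drop (i + 1)) (st.length + 1) false = true := by
              rw [hd] at hb
              simpa only [pvBalOk, List.foldl_cons, hc3, step_open] using hb
            have hs1 : pvStraySeen (stream.toList.drop (i + 1)) false = false := by
              rw [hd] at hstray
              simpa only [pvStraySeen, List.foldl_cons, hc3,
                sstep_other _ _ hc1 hgt hlt5] using hstray
            have hlen1 : (st ++ [(((st.length : Int) + 1), (i : Int))]).length = st.length + 1 := by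
              simp
            have ih1 := ih (i + 1) (by omega) fb' (by omega)
              (st ++ [(((st.length : Int) + 1), (i : Int))]) g gb
              (by rw [hlen1]; exact hb1) (by exact hs1)
            rw [hlen1] at ih1
            have hcast : ((st.length + 1 : Nat) : Int) + 1 = ((st.length : Int) + 1) + 1 := by
              push_cast; ring
            rw [hcast] at ih1
            obtain ⟨ihc, ihe⟩ := ih1
            have hr1ge := parseSeq_ge stream fb' (i + 1) (((st.length : Int) + 1) + 1) g gb
            rw [parseSeq_open stream fb' i ((st.length : Int) + 1) g gb hi hc1 hc2 hc3,
              aLoop_open _ _ _ _ _ _ _ _ hc1 hgt hc3, ihe]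
            by_cases hj1 : (parseSeq stream fb' (i + 1) (((st.length : Int) + 1) + 1) g gb).1 <
                stream.toList.length
            · obtain ⟨-, hb2, hs2⟩ := ihc hj1
              simp only [Nat.add_sub_cancel] at hb2
              have ih2 := ih ((parseSeq stream fb' (i + 1) (((st.length : Int) + 1) + 1) g gb).1 + 1)
                (by omega) fb' (by omega) st
                ((parseSeq stream fb' (i + 1) (((st.length : Int) + 1) + 1) g gb).2.1 ++
                  [(((st.length : Int) + 1), PySem.Str.slice stream (some (i : Int))
                    (some (((parseSeq stream fb' (i + 1) (((st.length : Int) + 1) + 1) g gb).1 : Int) + 1)))])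
                (parseSeq stream fb' (i + 1) (((st.length : Int) + 1) + 1) g gb).2.2 hb2 hs2
              obtain ⟨ihc2, ihe2⟩ := ih2
              rw [if_pos hj1, List.getLast?_concat, List.dropLast_concat]
              dsimp only
              have hcast2 : ((st.length + 1 : Nat) : Int) = (st.length : Int) + 1 := by push_cast; ring
              rw [hcast2, ihe2, if_pos hj1]
              exact ⟨fun hlt => ihc2 hlt, rfl⟩
            · rw [if_neg hj1, if_neg hj1,
                parseSeq_nil stream fb'
                  ((parseSeq stream fb' (i + 1) (((st.length : Int) + 1) + 1) g gb).1 + 1)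
                  ((st.length : Int) + 1)
                  (parseSeq stream fb' (i + 1) (((st.length : Int) + 1) + 1) g gb).2.1
                  (parseSeq stream fb' (i + 1) (((st.length : Int) + 1) + 1) g gb).2.2 (by omega)]
              constructor
              · intro hlt; dsimp at hlt; omega
              · rw [if_neg (by dsimp; omega)]
          · by_cases hc4 : stream.toList[i] = '}'
            · have hgt : ¬ stream.toList[i] = '>' := by rw [hc4]; decide
              have hlt5 : ¬ stream.toList[i] = '<' := by rw [hc4]; decide
              have hs2 : pvStraySeen (stream.toList.drop (i + 1)) false = false := by
                rw [hd] at hstray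
                simpa only [pvStraySeen, List.foldl_cons,
                  sstep_other _ _ hc1 hgt hlt5] using hstray
              rw [hd, hc4] at hb
              simp only [pvBalOk, List.foldl_cons, step_close] at hb
              have hdpos : 0 < st.length := by
                by_contra h0
                have hz : (true && decide (0 < st.length)) = false := by simp [h0]
                rw [hz, balFoldl_false _ _ rfl] at hb
                exact Bool.false_ne_true hb
              have hb2 : pvBalOk (stream.toList.drop (i + 1)) (st.length - 1) false = true := by
                have ho : (true && decide (0 < st.length)) = true := by simp [hdpos]
                rw [ho] at hb
                exact hb
              have hst : st ≠ [] := by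
                intro h; rw [h] at hdpos; simp at hdpos
              obtain ⟨st', a, hsteq⟩ := (List.eq_nil_or_concat st).resolve_left hst
              rw [List.concat_eq_append] at hsteq
              obtain ⟨lv, sd⟩ := a
              rw [parseSeq_close stream fb' i ((st.length : Int) + 1) g gb hi hc1 hc2 hc3 hc4]
              constructor
              · intro _; exact ⟨hst, hb2, hs2⟩
              · have hlast : st.getLast? = some (lv, sd) := by
                  rw [hsteq]; exact List.getLast?_concat
                have hdrop : st.dropLast = st' := by
                  rw [hsteq]; exact List.dropLast_concat
                rw [if_pos hi, hlast, hdrop]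
                dsimp only
                conv_lhs => rw [hsteq]
                rw [aLoop_close _ _ _ _ _ _ _ _ _ _ hc1 hgt hc4]
                have hglv : ((st' ++ [(lv, sd)]).length : Int) + 1 - 1 = (st.length : Int) := by
                  rw [← hsteq]; ring
                rw [hglv]
            · by_cases hc5 : stream.toList[i] = '>'
              · exfalso
                rw [hd, hc5] at hstray
                simp only [pvStraySeen, List.foldl_cons, sstep_gt] at hstray
                rw [strayFoldl_true _ _ rfl] at hstray
                exact absurd hstray (by decide)
              · have hb2 : pvBalOk (stream.toList.drop (i + 1)) st.length false = true := by
                  rw [hd] at hb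
                  simpa only [pvBalOk, List.foldl_cons,
                    step_other _ _ _ hc1 hc3 hc4 hc2, if_neg hc5] using hb
                have hs2 : pvStraySeen (stream.toList.drop (i + 1)) false = false := by
                  rw [hd] at hstray
                  simpa only [pvStraySeen, List.foldl_cons,
                    sstep_other _ _ hc1 hc5 hc2] using hstray
                rw [parseSeq_other stream fb' i ((st.length : Int) + 1) g gb hi hc1 hc2 hc3 hc4,
                  aLoop_other _ _ _ _ _ _ _ _ hc1 hc5 hc3 hc4 hc2]
                exact ih (i + 1) (by omega) fb' (by omega) st g gb hb2 hs2
    · rw [parseSeq_nil stream fb i ((st.length : Int) + 1) g gb hi]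
      constructor
      · intro hlt; dsimp at hlt; omega
      · rw [enumFrom_nil _ _ hi, if_neg (by dsimp; omega)]
        simp [aLoop]

-- ===== VERDICT (by name: the statement is the Claim_ definition above) =====
theorem parse_spec : Claim_unchanged_parse := by
  intro stream _ hpre
  unfold Spec_parse
  intro hnd
  unfold Pre_parse at hpre
  have hs0 : pvStraySeen stream.toList false = false := by
    unfold D_parse at hnd
    exact Bool.not_eq_true _ ▸ (Bool.eq_false_iff.mpr (fun h => hnd h))
  have hm := main_lemma stream (stream.toList.length + 1) 0 (by omega)
    (stream.toList.length + 1) (by omega) [] [] [] (by simpa using hpre)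
    (by simpa using hs0)
  simp only [List.length_nil, Nat.cast_zero, zero_add] at hm
  obtain ⟨hc, he⟩ := hm
  have hge : ¬ (parseSeq stream (stream.toList.length + 1) 0 1 [] []).1 < stream.toList.length := by
    intro h; exact (hc h).1 rfl
  rw [if_neg hge] at he
  unfold parse parse_alt
  rw [← enumFrom_zero, he]
  by_cases h0 : 0 < stream.toList.length
  · obtain ⟨n', hn'⟩ : ∃ n', stream.toList.length = n' + 1 := ⟨stream.toList.length - 1, by omega⟩
    rw [hn', parseTop_succ _ _ _ _ _ (by omega), ← hn',
      parseTop_nil _ _ _ _ _ (by omega)]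
  · rw [parseTop_nil _ _ _ _ _ h0,
      parseSeq_nil stream (stream.toList.length + 1) 0 1 [] [] h0]

theorem parse_changed : Claim_changed_parse := by
  unfold Claim_changed_parse; decide
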